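-- pv_equiv track=rewrite | github.com/GhostOfMadness/leetcode | medium/2434.py | suffix_algo
-- ===== SOURCE A (Python) =====
-- from collections import Counter, deque
--
-- def suffix_algo(s: str) -> str:
--     q = deque(s)
--     t = []
--     ans = ''
--     i = 0
--     n = len(s)
--     suffix = [s[-1]] * n
--     for j in range(n - 2, -1, -1):
--         suffix[j] = min(s[j], suffix[j + 1])
--     while q:
--         if t and t[-1] <= suffix[i]:
--             ans += t.pop()
--         else:
--             t.append(q.popleft())
--             i += 1
--     ans += ''.join(t[::-1])
--     return ans
-- ===== SOURCE B (Python) =====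
-- from collections import Counter
--
-- def suffix_algo(s: str) -> str:
--     cnt = Counter(s)
--     order = sorted(cnt)          # distinct characters, ascending
--     p = 0                        # order[p] = smallest char still unconsumed
--     stack = []
--     out = []
--     for c in s:
--         cnt[c] -= 1
--         stack.append(c)
--         while p < len(order) and cnt[order[p]] == 0:
--             p += 1
--         while stack and p < len(order) and stack[-1] <= order[p]:
--             out.append(stack.pop())
--     out.extend(reversed(stack))
--     return ''.join(out)
-- ===== Notes on version B (the rewrite author's own statement) =====
-- stated objective: alternative
-- what changed: Replaces the precomputed suffix-minimum array and deque with an incrementally maintained smallest remaining character: a Counter of the string plus a monotone pointer into the sorted list of distinct characters, advanced as counts reach zero; the greedy stack is popped against that pointer.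
import Mathlib
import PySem

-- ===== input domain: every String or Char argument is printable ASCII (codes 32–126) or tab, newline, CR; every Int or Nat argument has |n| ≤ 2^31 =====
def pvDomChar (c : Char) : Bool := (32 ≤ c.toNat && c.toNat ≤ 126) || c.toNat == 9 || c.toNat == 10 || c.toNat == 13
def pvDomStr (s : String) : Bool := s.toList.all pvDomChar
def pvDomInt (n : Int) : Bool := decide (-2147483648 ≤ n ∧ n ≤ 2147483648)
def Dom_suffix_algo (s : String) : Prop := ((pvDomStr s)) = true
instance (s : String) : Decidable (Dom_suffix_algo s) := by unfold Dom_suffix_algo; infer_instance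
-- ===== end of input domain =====

-- B replaces A's precomputed suffix-minimum array with a character Counter and a monotone
-- pointer into the sorted distinct characters (objective: alternative data structure, same cost).

-- ===== PORT A =====
-- A's greedy loop; the Python stack t (append/pop at the end) is represented top-first
-- (cons/head), so ''.join(t[::-1]) is the list itself.
def suffix_algoLoop (suffix : List Char) : List Char → List Char → List Char → Int → List Char
  | [], t, ans, _ => ans ++ t
  | c :: q, h :: t, ans, i =>
      if h ≤ PySem.List.pyGetD suffix i 'a'
      then suffix_algoLoop suffix (c :: q) t (ans ++ [h]) i
      else suffix_algoLoop suffix q (c :: h :: t) ans (i + 1)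
  | c :: q, [], ans, i => suffix_algoLoop suffix q [c] ans (i + 1)
termination_by q t => 2 * q.length + t.length

def suffix_algo (s : String) : String :=
  match PySem.List.pyGet? s.toList (-1) with
  | none => ""   -- Python raises IndexError here (s = ""), excluded by Pre_
  | some lastc =>
    let cs := s.toList
    let n : Int := cs.length
    let suffix0 : List Char := List.replicate n.toNat lastc
    let suffix := (PySem.List.pyRange (n - 2) (-1) (-1)).foldl
      (fun a j => PySem.List.pySetD a j
        (min (PySem.List.pyGetD cs j 'a') (PySem.List.pyGetD a (j + 1) 'a'))) suffix0
    String.ofList (suffix_algoLoop suffix cs [] [] 0)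

-- ===== PORT B =====
-- advance the pointer while the current smallest distinct char has count 0
def altAdv (order : List Char) (cnt : PySem.Dict Char Int) (p : Int) : Int :=
  if h : p < (order.length : Int) ∧ cnt.getD (PySem.List.pyGetD order p 'a') 0 = 0
  then altAdv order cnt (p + 1) else p
termination_by ((order.length : Int) + 1 - p).toNat
decreasing_by omega

-- pop the stack (top-first) while its top is ≤ order[p]
def altPop (order : List Char) (p : Int) : List Char → List Char → List Char × List Char
  | [], out => ([], out)
  | h :: st, out =>
      if p < (order.length : Int) ∧ h ≤ PySem.List.pyGetD order p 'a'
      then altPop order p st (out ++ [h]) else (h :: st, out)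

-- the main 'for c in s' loop; stack is top-first, so reversed(stack) is the list itself
def altLoop (order : List Char) : List Char → PySem.Dict Char Int → Int → List Char → List Char → List Char
  | [], _, _, stack, out => out ++ stack
  | c :: rest, cnt, p, stack, out =>
      let cnt' := cnt.modify c 0 (· - 1)
      let p' := altAdv order cnt' p
      let (stack', out') := altPop order p' (c :: stack) out
      altLoop order rest cnt' p' stack' out'

def suffix_algo_alt (s : String) : String :=
  let cs := s.toList
  let cnt := PySem.Dict.counter cs
  let order := PySem.List.sorted cnt.keys (fun x => x) false
  String.ofList (altLoop order cs cnt 0 [] [])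

-- ===== PRECONDITION & SPEC =====
-- Pre_ excludes only the empty string, on which A raises IndexError (s[-1]).
def Pre_suffix_algo (s : String) : Prop := s ≠ ""
instance (s : String) : Decidable (Pre_suffix_algo s) := by unfold Pre_suffix_algo; infer_instance
def pvWitness_suffix_algo : String := "cbaab"

def Spec_suffix_algo (s : String) (out : String) : Prop := out = suffix_algo_alt s
instance (s : String) (out : String) : Decidable (Spec_suffix_algo s out) := by unfold Spec_suffix_algo; infer_instance

-- ===== CLAIM (what is proved, stated in full; the proofs are below) =====
def Claim_equal_suffix_algo : Prop := ∀ (s : String), Dom_suffix_algo s → Pre_suffix_algo s → Spec_suffix_algo s (suffix_algo s)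

-- ===== LEMMAS AND PROOFS =====

-- the common reference greedy: pop while the stack top is ≤ the minimum of the
-- unconsumed input, else push the next input char (stack kept top-first)
def goA : List Char → List Char → List Char
  | [], t => t
  | c :: q, h :: t => if h ≤ q.foldl min c then h :: goA (c :: q) t else goA q (c :: h :: t)
  | c :: q, [] => goA q [c]
termination_by q t => 2 * q.length + t.length

-- minimum of a nonempty char list
def minQ : List Char → Char
  | [] => 'a'
  | c :: l => l.foldl min c

theorem foldl_min_comm (l : List Char) : ∀ a b : Char, l.foldl min (min a b) = min a (l.foldl min b) := by
  induction l with
  | nil => intro a b; rfl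
  | cons x xs ih => intro a b; simp only [List.foldl_cons]; rw [min_assoc, ih]

theorem minQ_cons (c : Char) (l : List Char) (h : l ≠ []) : minQ (c :: l) = min c (minQ l) := by
  cases l with
  | nil => exact absurd rfl h
  | cons x xs => simp only [minQ, List.foldl_cons]; rw [foldl_min_comm]

theorem minQ_le (l : List Char) : ∀ y ∈ l, minQ l ≤ y := by
  cases l with
  | nil => intro y hy; cases hy
  | cons c t =>
    intro y hy
    rcases List.mem_cons.mp hy with rfl | hy
    · exact (PySem.List.foldl_min_le t y).1
    · exact (PySem.List.foldl_min_le t c).2 y hy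

theorem minQ_mem (l : List Char) (h : l ≠ []) : minQ l ∈ l := by
  cases l with
  | nil => exact absurd rfl h
  | cons c t =>
    rcases PySem.List.foldl_min_mem t c with h1 | h1
    · exact (by simp [minQ, h1] : minQ (c :: t) ∈ c :: t)
    · exact List.mem_cons_of_mem c (by simpa [minQ] using h1)

theorem minQ_eq (l : List Char) (x : Char) (hx : x ∈ l) (hlb : ∀ y ∈ l, x ≤ y) : minQ l = x :=
  le_antisymm (minQ_le l x hx) (hlb _ (minQ_mem l (List.ne_nil_of_mem hx)))

-- goA pops exactly the prefix of the stack that is ≤ the minimum of the input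
theorem goA_pop (q : List Char) (hq : q ≠ []) :
    ∀ t : List Char, goA q t =
      t.takeWhile (fun h => decide (h ≤ minQ q)) ++ goA q (t.dropWhile (fun h => decide (h ≤ minQ q))) := by
  intro t
  induction t with
  | nil => simp
  | cons h t ih =>
    obtain ⟨c, q', rfl⟩ : ∃ c q', q = c :: q' := by
      cases q with
      | nil => exact absurd rfl hq
      | cons a b => exact ⟨a, b, rfl⟩
    by_cases hle : h ≤ minQ (c :: q')
    · have hle' : h ≤ q'.foldl min c := hle
      rw [goA, if_pos hle', List.takeWhile_cons_of_pos (by simpa using hle),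
        List.dropWhile_cons_of_pos (by simpa using hle), ih]
      simp
    · have hle' : ¬ h ≤ q'.foldl min c := hle
      rw [goA, if_neg hle', List.takeWhile_cons_of_neg (by simpa using hle),
        List.dropWhile_cons_of_neg (by simpa using hle)]
      simp [goA, if_neg hle']

-- goA pushes when the stack top exceeds the minimum
theorem goA_push (c : Char) (rest stack : List Char)
    (hI : ∀ h, stack.head? = some h → ¬ h ≤ minQ (c :: rest)) :
    goA (c :: rest) stack = goA rest (c :: stack) := by
  cases stack with
  | nil => rw [goA]
  | cons h t =>
    rw [goA]
    exact if_neg (hI h rfl)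

-- ===== A side =====

-- correctness of A's right-to-left suffix-minimum fold
theorem suffix_fold (cs : List Char) :
    ∀ (m : Nat) (arr : List Char), arr.length = cs.length → m + 1 ≤ cs.length →
      (∀ k : Nat, m ≤ k → k < cs.length → arr.getD k 'a' = minQ (cs.drop k)) →
      ∀ k : Nat, k < cs.length →
        ((PySem.List.pyRange ((m : Int) - 1) (-1) (-1)).foldl
          (fun a j => PySem.List.pySetD a j
            (min (PySem.List.pyGetD cs j 'a') (PySem.List.pyGetD a (j + 1) 'a'))) arr).getD k 'a'
        = minQ (cs.drop k) := by
  intro m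
  induction m with
  | zero =>
    intro arr h1 h2 h3 k hk
    rw [show ((0 : Nat) : Int) - 1 = (-1 : Int) by norm_num,
      PySem.List.pyRange_neg_one_eq_nil (by norm_num)]
    exact h3 k (Nat.zero_le k) hk
  | succ m ih =>
    intro arr hlen hm h3 k hk
    rw [show ((m + 1 : Nat) : Int) - 1 = ((m : Nat) : Int) by push_cast; ring,
      PySem.List.pyRange_neg_one_cons (by omega), List.foldl_cons]
    have hmlt : m + 1 < cs.length := by omega
    apply ih
    · rw [PySem.List.pySetD_natCast, List.length_set, hlen]
    · omega
    · intro j hj1 hj2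
      rw [PySem.List.pySetD_natCast]
      rcases Nat.eq_or_lt_of_le hj1 with heq | hjlt
      · -- j = m : the freshly written cell
        subst heq
        have hja : m < arr.length := by omega
        rw [List.getD_eq_getElem _ _ (by simpa using hja), List.getElem_set_self]
        have e1 : PySem.List.pyGetD cs ((m : Nat) : Int) 'a' = cs[m]'(by omega) := by
          rw [PySem.List.pyGetD_natCast, List.getD_eq_getElem _ _ (by omega)]
        have e2 : PySem.List.pyGetD arr (((m : Nat) : Int) + 1) 'a' = minQ (cs.drop (m + 1)) := by
          rw [show ((m : Nat) : Int) + 1 = ((m + 1 : Nat) : Int) by push_cast; ring,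
            PySem.List.pyGetD_natCast]
          exact h3 (m + 1) le_rfl (by omega)
        rw [e1, e2]
        have hdrop : cs.drop m = cs[m]'(by omega) :: cs.drop (m + 1) :=
          List.drop_eq_getElem_cons (by omega)
        have hne : cs.drop (m + 1) ≠ [] := by
          intro h
          have := List.drop_eq_nil_iff.mp h
          omega
        rw [hdrop, minQ_cons _ _ hne]
      · -- j > m : unchanged cell
        have hcell : ∀ v : Char, (arr.set m v).getD j 'a' = arr.getD j 'a' := by
          intro v
          rw [List.getD_eq_getElem?_getD, List.getD_eq_getElem?_getD,
            List.getElem?_set_ne (by omega)]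
        rw [hcell]
        exact h3 j (by omega) hj2
    · exact hk

-- A's while loop equals the reference greedy
theorem loopA_eq (cs SA : List Char)
    (hSA : ∀ k : Nat, k < cs.length → SA.getD k 'a' = minQ (cs.drop k)) :
    ∀ (N : Nat) (q t ans : List Char) (k : Nat), 2 * q.length + t.length ≤ N →
      q = cs.drop k →
      suffix_algoLoop SA q t ans ((k : Nat) : Int) = ans ++ goA q t := by
  intro N
  induction N with
  | zero =>
    intro q t ans k hN hq
    cases q with
    | cons a b => exfalso; simp at hN
    | nil =>
      cases t with
      | cons a b => exfalso; simp at hN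
      | nil => simp [suffix_algoLoop, goA]
  | succ N ih =>
    intro q t ans k hN hq
    cases q with
    | nil => simp [suffix_algoLoop, goA]
    | cons c q' =>
      have hk : k < cs.length := by
        by_contra hco
        rw [List.drop_eq_nil_of_le (by omega)] at hq
        simp at hq
      have hmin : PySem.List.pyGetD SA ((k : Nat) : Int) 'a' = minQ (c :: q') := by
        rw [PySem.List.pyGetD_natCast, hSA k hk, ← hq]
      have hq' : q' = cs.drop (k + 1) := by
        rw [← List.tail_drop, ← hq, List.tail_cons]
      have hcast : ((k : Nat) : Int) + 1 = ((k + 1 : Nat) : Int) := by push_cast; ring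
      cases t with
      | nil =>
        rw [suffix_algoLoop, hcast, ih q' [c] ans (k + 1) (by simp at hN ⊢; omega) hq', goA]
      | cons h t' =>
        rw [suffix_algoLoop, hmin]
        by_cases hle : h ≤ minQ (c :: q')
        · rw [if_pos hle, ih (c :: q') t' (ans ++ [h]) k (by simp at hN ⊢; omega) hq,
            goA, if_pos (show h ≤ List.foldl min c q' from hle)]
          simp
        · rw [if_neg hle, hcast, ih q' (c :: h :: t') ans (k + 1) (by simp at hN ⊢; omega) hq',
            goA, if_neg (show ¬ h ≤ List.foldl min c q' from hle)]

-- ===== B side =====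

-- the pointer-advance loop: lands on the first index ≥ p whose count is nonzero
theorem altAdv_spec (order : List Char) (cnt : PySem.Dict Char Int) :
    ∀ (fuel pn : Nat), order.length - pn ≤ fuel → pn ≤ order.length →
      ∃ pn' : Nat, altAdv order cnt ((pn : Nat) : Int) = ((pn' : Nat) : Int) ∧ pn ≤ pn' ∧ pn' ≤ order.length ∧
        (∀ j : Nat, pn ≤ j → j < pn' → cnt.getD (order.getD j 'a') 0 = 0) ∧
        (pn' < order.length → cnt.getD (order.getD pn' 'a') 0 ≠ 0) := by
  intro fuel
  induction fuel with
  | zero =>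
    intro pn h1 h2
    have hpe : pn = order.length := by omega
    refine ⟨pn, ?_, le_rfl, h2, fun j hj1 hj2 => by omega, fun h => by omega⟩
    rw [altAdv, dif_neg]
    intro hc
    have h := hc.1
    omega
  | succ fuel ih =>
    intro pn h1 h2
    rw [altAdv]
    by_cases hc : ((pn : Nat) : Int) < (order.length : Int) ∧
        cnt.getD (PySem.List.pyGetD order ((pn : Nat) : Int) 'a') 0 = 0
    · rw [dif_pos hc]
      have hpn : pn < order.length := by exact_mod_cast hc.1
      rw [show ((pn : Nat) : Int) + 1 = ((pn + 1 : Nat) : Int) by push_cast; ring]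
      obtain ⟨pn', e, hle, hub, hzero, hnz⟩ := ih (pn + 1) (by omega) (by omega)
      refine ⟨pn', e, by omega, hub, ?_, hnz⟩
      intro j hj1 hj2
      rcases Nat.eq_or_lt_of_le hj1 with rfl | hlt
      · have := hc.2
        rwa [PySem.List.pyGetD_natCast] at this
      · exact hzero j hlt hj2
    · rw [dif_neg hc]
      refine ⟨pn, rfl, le_rfl, h2, fun j hj1 hj2 => by omega, fun hlt h0 => ?_⟩
      exact hc ⟨by exact_mod_cast hlt, by rwa [PySem.List.pyGetD_natCast]⟩

-- the pop loop is takeWhile/dropWhile of one fixed predicate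
theorem altPop_eq (order : List Char) (p : Int) :
    ∀ stack out, altPop order p stack out =
      (stack.dropWhile (fun h => decide (p < (order.length : Int) ∧ h ≤ PySem.List.pyGetD order p 'a')),
       out ++ stack.takeWhile (fun h => decide (p < (order.length : Int) ∧ h ≤ PySem.List.pyGetD order p 'a'))) := by
  intro stack
  induction stack with
  | nil => intro out; simp [altPop]
  | cons h st ih =>
    intro out
    by_cases hc : p < (order.length : Int) ∧ h ≤ PySem.List.pyGetD order p 'a'
    · rw [altPop, if_pos hc, ih, List.dropWhile_cons_of_pos (by simpa using hc),
        List.takeWhile_cons_of_pos (by simpa using hc)]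
      simp
    · rw [altPop, if_neg hc, List.dropWhile_cons_of_neg (by simpa using hc),
        List.takeWhile_cons_of_neg (by simpa using hc)]
      simp

-- B's main loop equals the reference greedy
theorem altLoop_eq (order : List Char) (ho : order.Pairwise (· < ·)) :
    ∀ (rest : List Char) (cnt : PySem.Dict Char Int) (pn : Nat) (stack out : List Char),
      (∀ ch : Char, cnt.getD ch 0 = (rest.count ch : Int)) →
      pn ≤ order.length →
      (∀ j : Nat, j < pn → order.getD j 'a' ∉ rest) →
      (∀ ch ∈ rest, ch ∈ order) →
      (∀ h, stack.head? = some h → rest ≠ [] → minQ rest < h) →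
      altLoop order rest cnt ((pn : Nat) : Int) stack out = out ++ goA rest stack := by
  intro rest
  induction rest with
  | nil =>
    intro cnt pn stack out _ _ _ _ _
    simp [altLoop, goA]
  | cons c rest ih =>
    intro cnt pn stack out hcnt hpn hnotin hmem hI
    rw [altLoop]
    set cnt' := cnt.modify c 0 (· - 1) with hcnt'def
    have hcnt' : ∀ ch : Char, cnt'.getD ch 0 = (rest.count ch : Int) := by
      intro ch
      rw [hcnt'def, PySem.Dict.getD_modify]
      by_cases h : ch = c
      · subst h
        rw [if_pos rfl, hcnt ch]
        simp
      · rw [if_neg h, hcnt ch]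
        have hne : ¬ c = ch := fun hh => h (Eq.symm hh)
        simp [hne]
    obtain ⟨pn', e, hle, hub, hzero, hnz⟩ :=
      altAdv_spec order cnt' (order.length - pn) pn le_rfl hpn
    rw [e, altPop_eq]
    have hnotin' : ∀ j : Nat, j < pn' → order.getD j 'a' ∉ rest := by
      intro j hj hmemj
      rcases Nat.lt_or_ge j pn with hjp | hjp
      · exact hnotin j hjp (List.mem_cons_of_mem c hmemj)
      · have h0 := hzero j hjp hj
        rw [hcnt' _] at h0
        have : rest.count (order.getD j 'a') = 0 := by exact_mod_cast h0
        exact (List.count_eq_zero.mp this) hmemj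
    have hpushI : ∀ h, stack.head? = some h → ¬ h ≤ minQ (c :: rest) := by
      intro h hh hle2
      exact absurd hle2 (not_le.mpr (hI h hh (List.cons_ne_nil c rest)))
    rw [goA_push c rest stack hpushI]
    by_cases hrest : rest = []
    · subst hrest
      -- pointer has run off the end: no pops, loop ends and dumps the stack
      have hpe : pn' = order.length := by
        by_contra hne
        have hnz' := hnz (by omega)
        rw [hcnt'] at hnz'
        simp at hnz'
      have hPc : ¬(((pn' : Nat) : Int) < (order.length : Int) ∧
          c ≤ PySem.List.pyGetD order ((pn' : Nat) : Int) 'a') := by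
        rw [hpe]; simp
      rw [List.takeWhile_cons_of_neg (by simpa using hPc),
        List.dropWhile_cons_of_neg (by simpa using hPc)]
      simp [altLoop, goA]
    · -- order[pn'] is exactly the minimum of the unconsumed rest
      have hpn'lt : pn' < order.length := by
        by_contra hge
        obtain ⟨x, hx⟩ := List.exists_mem_of_ne_nil rest hrest
        obtain ⟨j, hj, hxe⟩ := List.getElem_of_mem (hmem x (List.mem_cons_of_mem c hx))
        have : order.getD j 'a' ∉ rest := hnotin' j (by omega)
        rw [List.getD_eq_getElem _ _ hj, hxe] at this
        exact this hx
      have hm : order.getD pn' 'a' = minQ rest := by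
        refine (minQ_eq rest _ ?_ ?_).symm
        · have := hnz hpn'lt
          rw [hcnt'] at this
          have : rest.count (order.getD pn' 'a') ≠ 0 := by
            intro h0; apply this; exact_mod_cast congrArg (Nat.cast : Nat → Int) h0
          exact List.count_pos_iff.mp (Nat.pos_of_ne_zero this)
        · intro y hy
          obtain ⟨j, hj, hye⟩ := List.getElem_of_mem (hmem y (List.mem_cons_of_mem c hy))
          have hjge : pn' ≤ j := by
            by_contra hjlt
            have := hnotin' j (by omega)
            rw [List.getD_eq_getElem _ _ hj, hye] at this
            exact this hy
          rcases Nat.eq_or_lt_of_le hjge with rfl | hjlt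
          · rw [List.getD_eq_getElem _ _ hj, hye]
          · rw [List.getD_eq_getElem _ _ (by omega), ← hye]
            exact le_of_lt ((List.pairwise_iff_getElem.mp ho) pn' j (by omega) hj hjlt)
      have hpred : (fun h => decide (((pn' : Nat) : Int) < (order.length : Int) ∧
            h ≤ PySem.List.pyGetD order ((pn' : Nat) : Int) 'a'))
          = (fun h => decide (h ≤ minQ rest)) := by
        funext x
        rw [PySem.List.pyGetD_natCast, hm]
        simp [hpn'lt]
      rw [hpred]
      show altLoop order rest cnt' ((pn' : Nat) : Int)
          ((c :: stack).dropWhile (fun h => decide (h ≤ minQ rest)))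
          (out ++ (c :: stack).takeWhile (fun h => decide (h ≤ minQ rest))) =
        out ++ goA rest (c :: stack)
      rw [ih cnt' pn' ((c :: stack).dropWhile (fun h => decide (h ≤ minQ rest)))
        (out ++ (c :: stack).takeWhile (fun h => decide (h ≤ minQ rest)))
        hcnt' hub hnotin' (fun ch hch => hmem ch (List.mem_cons_of_mem c hch)) ?hI']
      case hI' =>
        intro h hh _
        have hf := List.head?_dropWhile_not (p := fun h => decide (h ≤ minQ rest))
          (l := c :: stack)
        rw [hh] at hf
        simpa using hf
      rw [goA_pop rest hrest (c :: stack)]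
      simp

-- ===== assembly =====

-- the A pipeline computes the reference greedy
theorem suffix_algo_A_eq (cs : List Char) (hcs : cs ≠ []) :
    suffix_algoLoop
      ((PySem.List.pyRange ((cs.length : Int) - 2) (-1) (-1)).foldl
        (fun a j => PySem.List.pySetD a j
          (min (PySem.List.pyGetD cs j 'a') (PySem.List.pyGetD a (j + 1) 'a')))
        (List.replicate ((cs.length : Int)).toNat (cs.getLast hcs)))
      cs [] [] 0 = goA cs [] := by
  have hlen1 : 1 ≤ cs.length := by
    cases hcse : cs with
    | nil => exact absurd hcse hcs
    | cons a b => simp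
  have hSA : ∀ k : Nat, k < cs.length →
      ((PySem.List.pyRange ((cs.length : Int) - 2) (-1) (-1)).foldl
        (fun a j => PySem.List.pySetD a j
          (min (PySem.List.pyGetD cs j 'a') (PySem.List.pyGetD a (j + 1) 'a')))
        (List.replicate ((cs.length : Int)).toNat (cs.getLast hcs))).getD k 'a'
      = minQ (cs.drop k) := by
    intro k hk
    rw [show ((cs.length : Int)) - 2 = ((cs.length - 1 : Nat) : Int) - 1 by
      push_cast [hlen1]; ring]
    apply suffix_fold cs (cs.length - 1) _ (by simp) (by omega) _ k hk
    intro j hj1 hj2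
    have hje : j = cs.length - 1 := by omega
    subst hje
    rw [List.getD_eq_getElem _ _ (by simp; omega), List.getElem_replicate]
    have hdrop : cs.drop (cs.length - 1) = [cs.getLast hcs] := by
      rw [List.drop_eq_getElem_cons (show cs.length - 1 < cs.length by omega),
        List.drop_eq_nil_of_le (by omega), List.getLast_eq_getElem]
    rw [hdrop]
    simp [minQ]
  have h0 : ((0 : Nat) : Int) = (0 : Int) := rfl
  have := loopA_eq cs _ hSA (2 * cs.length + 0) cs [] [] 0 (by simp) (by simp)
  rw [h0] at this
  simpa using this

-- the B pipeline computes the reference greedy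
theorem suffix_algo_B_eq (cs : List Char) :
    altLoop (PySem.List.sorted (PySem.Dict.counter cs).keys (fun x => x) false)
      cs (PySem.Dict.counter cs) 0 [] [] = goA cs [] := by
  have hkeys : (PySem.Dict.counter cs).keys = PySem.Set.ofList cs :=
    PySem.Dict.keys_counter cs
  have ho : (PySem.List.sorted (PySem.Dict.counter cs).keys (fun x => x) false).Pairwise (· < ·) := by
    rw [hkeys]
    exact PySem.List.sorted_ofList_pairwise_lt cs
  have hB := altLoop_eq _ ho cs (PySem.Dict.counter cs) 0 [] []
    (fun ch => PySem.Dict.getD_counter cs ch) (by omega)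
    (fun j hj => by omega)
    (fun ch hch => by
      rw [PySem.List.mem_sorted, hkeys, PySem.Set.mem_ofList]; exact hch)
    (fun h hh _ => by cases hh)
  simpa using hB

-- ===== VERDICT (by name: the statement is the Claim_ definition above) =====
theorem suffix_algo_spec : Claim_equal_suffix_algo := by
  unfold Claim_equal_suffix_algo
  intro s _ hpre
  unfold Spec_suffix_algo
  have hcs : s.toList ≠ [] := by
    intro h
    exact hpre (String.toList_inj.mp (by simpa using h))
  have hmatch : suffix_algo s = String.ofList (suffix_algoLoop
      ((PySem.List.pyRange ((s.toList.length : Int) - 2) (-1) (-1)).foldl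
        (fun a j => PySem.List.pySetD a j
          (min (PySem.List.pyGetD s.toList j 'a') (PySem.List.pyGetD a (j + 1) 'a')))
        (List.replicate ((s.toList.length : Int)).toNat (s.toList.getLast hcs)))
      s.toList [] [] 0) := by
    rw [suffix_algo, PySem.List.pyGet?_neg_one, List.getLast?_eq_some_getLast (h := hcs)]
  rw [hmatch, suffix_algo_alt, suffix_algo_A_eq s.toList hcs, suffix_algo_B_eq s.toList]
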